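-- pv_equiv track=rewrite | github.com/stacksmashing/gb-wordle | wordle_compress/generate_words.py | decompress_wordlist_varlen
-- ===== SOURCE A (Python) =====
-- import string
--
-- def unpack_varint(data):
--     """Unpack a variable length integer into a number"""
--     res = 0
--     for i, b in enumerate(data):
--         value = b & 0x7F
--         more = b >> 7
--         res += value << (7*i)
--         if more == 0:
--             break
--     return res+1, i+1
--
-- def to_b26(word, l=5):
--     """Convert a number into a word by converting it into a base 26 number"""
--     digits = []
--     while word > 0:
--         digits.append(word % 26)
--         word = word // 26
--
--     return ''.join(string.ascii_lowercase[x] for x in digits[::-1]).rjust(l, 'a')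
--
-- def decompress_wordlist_varlen(compressed):
--     """Decompress a list of words from a delta encoded sequence of variable length integers"""
--     words = []
--     current_word = 0
--     current = 0
--
--     while current < len(compressed):
--         delta, word_len = unpack_varint(compressed[current:])
--         current_word += delta
--         current += word_len
--         words.append(to_b26(current_word))
--
--     return words
-- ===== SOURCE B (Python) =====
-- import string
--
--
-- def _word5(n, l=5):
--     """Base-26 word for n, built by prepending letters, left-padded with 'a'."""
--     s = ''
--     while n > 0:
--         s = string.ascii_lowercase[n % 26] + s
--         n //= 26
--     return 'a' * max(l - len(s), 0) + s
--
--
-- def decompress_wordlist_varlen(compressed):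
--     """Decompress a list of words from a delta encoded sequence of variable length integers"""
--     # pass 1: stream the bytes once, decoding the varint deltas (+1 offset each)
--     deltas = []
--     acc = 0
--     shift = 0
--     for b in compressed:
--         acc += (b & 0x7F) << shift
--         if (b >> 7) == 0:
--             deltas.append(acc + 1)
--             acc = 0
--             shift = 0
--         else:
--             shift += 7
--     if shift:  # trailing unterminated varint still yields a word
--         deltas.append(acc + 1)
--     # pass 2: prefix sums turn deltas into absolute indices
--     totals = []
--     t = 0
--     for d in deltas:
--         t += d
--         totals.append(t)
--     # pass 3: render
--     return [_word5(t) for t in totals]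
-- ===== Notes on version B (the rewrite author's own statement) =====
-- stated objective: alternative
-- what changed: A's single fused while-loop that repeatedly slices the list and re-enters unpack_varint is replaced by three passes: one byte-by-byte streaming scan decoding all varint deltas, a prefix-sum pass turning deltas into absolute indices, and a map rendering each index with a base-26 helper that prepends letters instead of building a digit list and reversing it.
import Mathlib
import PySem

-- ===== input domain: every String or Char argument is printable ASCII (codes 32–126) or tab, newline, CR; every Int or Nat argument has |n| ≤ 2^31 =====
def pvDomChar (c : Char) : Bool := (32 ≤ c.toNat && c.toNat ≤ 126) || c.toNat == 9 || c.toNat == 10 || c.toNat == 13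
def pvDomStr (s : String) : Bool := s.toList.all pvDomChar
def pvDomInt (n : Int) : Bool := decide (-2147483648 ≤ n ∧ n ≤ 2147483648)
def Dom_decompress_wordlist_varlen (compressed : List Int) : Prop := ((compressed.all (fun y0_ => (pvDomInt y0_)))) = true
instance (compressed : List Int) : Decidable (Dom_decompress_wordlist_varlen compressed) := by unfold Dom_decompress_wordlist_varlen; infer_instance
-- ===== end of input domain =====

-- B replaces A's fused slice-and-reparse loop by three passes (streaming varint decode,
-- prefix sums, base-26 rendering); same cost, different decomposition; return values proved equal.


-- ===== PORT A =====
-- string.ascii_lowercase (shared by both ports, as in the Python module)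
def pvLower : List Char :=
  ['a','b','c','d','e','f','g','h','i','j','k','l','m',
   'n','o','p','q','r','s','t','u','v','w','x','y','z']

-- A's `while word > 0: digits.append(word % 26); word //= 26` loop (digits grows at the end)
def b26loopA (word : Int) (digits : List Int) : List Int :=
  if _h : 0 < word then
    b26loopA (PySem.Int.floordiv word 26) (digits ++ [PySem.Int.mod word 26])
  else digits
termination_by word.toNat
decreasing_by
  have h26 : PySem.Int.floordiv word 26 = word / 26 :=
    PySem.Int.floordiv_eq_ediv_of_pos (by omega)
  omega

-- to_b26: digits[::-1] via the slice primitive; ''.join of one-char strings is the char list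
-- itself; rjust(l,'a') = left pad with 'a' to width l (exact: Nat subtraction truncates like max(l-len,0)).
-- string.ascii_lowercase[x] is indexed with x = word % 26 ∈ [0,26), so the default of pyGetD is never used.
def to_b26 (word : Int) (l : Int) : String :=
  let digits := b26loopA word []
  let chars := ((PySem.List.slice? digits none none (-1)).getD []).map
      (fun x => PySem.List.pyGetD pvLower x 'a')
  String.ofList (List.replicate (l.toNat - chars.length) 'a' ++ chars)

-- A's unpack_varint: `for i, b in enumerate(data): … if more == 0: break; return res+1, i+1`.
-- i is the count of bytes consumed so far; the [] case is the loop running off the end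
-- (only reached with i > 0 inside port A, matching Python, where data is never empty).
def upkA : List Int → Nat → Int → Int × Nat
  | [], i, res => (res + 1, i)
  | b :: t, i, res =>
      let value := PySem.Int.band b 127
      let more := b >>> 7
      let res' := res + (value <<< (7 * i))
      if more = 0 then (res' + 1, i + 1) else upkA t (i + 1) res'

theorem upkA_snd_le : ∀ (l : List Int) (i : Nat) (res : Int), i ≤ (upkA l i res).2 := by
  intro l
  induction l with
  | nil => intro i res; simp [upkA]
  | cons b t ih =>
      intro i res
      simp only [upkA]
      split
      · simp
      · exact Nat.le_of_succ_le (ih (i + 1) _)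

theorem upkA_snd_pos (b : Int) (t : List Int) (i : Nat) (res : Int) :
    i + 1 ≤ (upkA (b :: t) i res).2 := by
  simp only [upkA]
  split
  · simp
  · exact upkA_snd_le t (i + 1) _

-- A's while-loop: `compressed[current:]` is `drop current`, and advancing `current` by
-- word_len makes the next slice `drop word_len` of the current rest; words.append = cons.
def decompA : List Int → Int → List String
  | [], _ => []
  | b :: t, cw =>
      let r := upkA (b :: t) 0 0
      let cw' := cw + r.1
      to_b26 cw' 5 :: decompA ((b :: t).drop r.2) cw'
termination_by l => l.length
decreasing_by
  have := upkA_snd_pos b t 0 0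
  simp [List.length_drop]
  omega

def decompress_wordlist_varlen (compressed : List Int) : List String :=
  decompA compressed 0

-- ===== PORT B =====
-- B's _word5: prepend letters while n > 0, then left-pad with 'a' * max(l - len, 0)
def word5go (n : Int) (s : List Char) : List Char :=
  if _h : 0 < n then
    word5go (PySem.Int.floordiv n 26) (PySem.List.pyGetD pvLower (PySem.Int.mod n 26) 'a' :: s)
  else s
termination_by n.toNat
decreasing_by
  have h26 : PySem.Int.floordiv n 26 = n / 26 :=
    PySem.Int.floordiv_eq_ediv_of_pos (by omega)
  omega

def word5 (n : Int) (l : Int) : String :=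
  let s := word5go n []
  String.ofList (List.replicate (l.toNat - s.length) 'a' ++ s)

-- B's pass 1 loop body: state = (deltas, acc, shift); shift is a bit count, always ≥ 0 in Python, so Nat
def stepB (st : List Int × Int × Nat) (b : Int) : List Int × Int × Nat :=
  let acc' := st.2.1 + ((PySem.Int.band b 127) <<< st.2.2)
  if b >>> 7 = 0 then (st.1 ++ [acc' + 1], 0, 0) else (st.1, acc', st.2.2 + 7)

def decompress_wordlist_varlen_alt (compressed : List Int) : List String :=
  let st := compressed.foldl stepB ([], 0, 0)
  let deltas := if st.2.2 ≠ 0 then st.1 ++ [st.2.1 + 1] else st.1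
  let totals := (deltas.foldl (fun (p : List Int × Int) d => (p.1 ++ [p.2 + d], p.2 + d)) ([], 0)).1
  totals.map (fun t => word5 t 5)

-- ===== PRECONDITION & SPEC =====
def Spec_decompress_wordlist_varlen (compressed : List Int) (out : List String) : Prop := out = decompress_wordlist_varlen_alt compressed
instance (compressed : List Int) (out : List String) : Decidable (Spec_decompress_wordlist_varlen compressed out) := by unfold Spec_decompress_wordlist_varlen; infer_instance

-- ===== CLAIM (what is proved, stated in full; the proofs are below) =====
def Claim_equal_decompress_wordlist_varlen : Prop := ∀ (compressed : List Int), Dom_decompress_wordlist_varlen compressed → Spec_decompress_wordlist_varlen compressed (decompress_wordlist_varlen compressed)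

-- ===== LEMMAS AND PROOFS =====

-- deltas decoded by the streaming pass when entered mid-varint with accumulator `acc` and shift `shift`
def contFrom (acc : Int) (shift : Nat) : List Int → List Int
  | [] => if shift ≠ 0 then [acc + 1] else []
  | b :: t =>
      let acc' := acc + ((PySem.Int.band b 127) <<< shift)
      if b >>> 7 = 0 then (acc' + 1) :: contFrom 0 0 t else contFrom acc' (shift + 7) t

-- prefix sums starting from cw
def prefixFrom (cw : Int) : List Int → List Int
  | [] => []
  | d :: ds => (cw + d) :: prefixFrom (cw + d) ds

-- L1: pass 1 of B (fold + final flush) = contFrom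
theorem foldl_stepB_eq (l : List Int) : ∀ (ds : List Int) (acc : Int) (shift : Nat),
    (let st := l.foldl stepB (ds, acc, shift);
     if st.2.2 ≠ 0 then st.1 ++ [st.2.1 + 1] else st.1) = ds ++ contFrom acc shift l := by
  induction l with
  | nil =>
      intro ds acc shift
      by_cases h : shift = 0 <;> simp [contFrom, h]
  | cons b t ih =>
      intro ds acc shift
      simp only [List.foldl_cons, stepB, contFrom]
      by_cases h : b >>> 7 = 0
      · simp only [h, if_true]
        rw [ih (ds ++ [acc + PySem.Int.band b 127 <<< shift + 1]) 0 0]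
        simp
      · simp only [h, if_false]
        rw [ih ds _ (shift + 7)]

-- L2: one varint of the stream = one call of A's unpack_varint, then restart fresh
theorem contFrom_eq_upkA : ∀ (l : List Int) (i : Nat) (acc : Int), (l ≠ [] ∨ 0 < i) →
    contFrom acc (7 * i) l =
      (upkA l i acc).1 :: contFrom 0 0 (l.drop ((upkA l i acc).2 - i)) := by
  intro l
  induction l with
  | nil =>
      intro i acc h
      have hi : 0 < i := h.resolve_left (not_not_intro rfl)
      simp [contFrom, upkA]
      omega
  | cons b t ih =>
      intro i acc _
      simp only [contFrom, upkA]
      by_cases h : b >>> 7 = 0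
      · simp [h]
      · simp only [h, if_false]
        have h7 : 7 * i + 7 = 7 * (i + 1) := by ring
        rw [h7, ih (i + 1) _ (Or.inr (Nat.succ_pos i))]
        have hle : i + 1 ≤ (upkA t (i + 1) (acc + PySem.Int.band b 127 <<< (7 * i))).2 :=
          upkA_snd_le t (i + 1) _
        have hdrop : (upkA t (i + 1) (acc + PySem.Int.band b 127 <<< (7 * i))).2 - i
            = ((upkA t (i + 1) (acc + PySem.Int.band b 127 <<< (7 * i))).2 - (i + 1)) + 1 := by
          omega
        rw [hdrop]
        simp [List.drop_succ_cons]

theorem floordiv26_toNat_lt (w : Int) (h : 0 < w) :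
    (PySem.Int.floordiv w 26).toNat < w.toNat := by
  have h26 : PySem.Int.floordiv w 26 = w / 26 :=
    PySem.Int.floordiv_eq_ediv_of_pos (by omega)
  omega

-- L4a: A's digit loop with accumulator
theorem b26loopA_acc_fuel (n : Nat) : ∀ (w : Int), w.toNat ≤ n →
    ∀ (ds : List Int), b26loopA w ds = ds ++ b26loopA w [] := by
  induction n with
  | zero =>
      intro w hw ds
      have h : ¬ 0 < w := by omega
      rw [b26loopA, dif_neg h, b26loopA, dif_neg h, List.append_nil]
  | succ n ih =>
      intro w hw ds
      by_cases h : 0 < w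
      · have hlt := floordiv26_toNat_lt w h
        have hL : b26loopA w ds
            = b26loopA (PySem.Int.floordiv w 26) (ds ++ [PySem.Int.mod w 26]) := by
          conv_lhs => rw [b26loopA]
          rw [dif_pos h]
        have hR : b26loopA w []
            = b26loopA (PySem.Int.floordiv w 26) [PySem.Int.mod w 26] := by
          conv_lhs => rw [b26loopA]
          rw [dif_pos h, List.nil_append]
        rw [hL, ih _ (by omega), hR, ih _ (by omega) [PySem.Int.mod w 26]]
        simp
      · rw [b26loopA, dif_neg h, b26loopA, dif_neg h, List.append_nil]

-- L4b: B's prepend loop builds exactly A's reversed digit list, mapped to letters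
theorem word5go_eq_fuel (n : Nat) : ∀ (w : Int), w.toNat ≤ n → ∀ (s : List Char),
    word5go w s = (b26loopA w []).reverse.map (fun x => PySem.List.pyGetD pvLower x 'a') ++ s := by
  induction n with
  | zero =>
      intro w hw s
      have h : ¬ 0 < w := by omega
      rw [word5go, dif_neg h, b26loopA, dif_neg h]
      simp
  | succ n ih =>
      intro w hw s
      by_cases h : 0 < w
      · have hlt := floordiv26_toNat_lt w h
        have hL : word5go w s = word5go (PySem.Int.floordiv w 26)
            (PySem.List.pyGetD pvLower (PySem.Int.mod w 26) 'a' :: s) := by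
          conv_lhs => rw [word5go]
          rw [dif_pos h]
        have hR : b26loopA w []
            = b26loopA (PySem.Int.floordiv w 26) [PySem.Int.mod w 26] := by
          conv_lhs => rw [b26loopA]
          rw [dif_pos h, List.nil_append]
        rw [hL, ih _ (by omega), hR,
          b26loopA_acc_fuel _ _ (le_refl _) [PySem.Int.mod w 26]]
        simp
      · rw [word5go, dif_neg h, b26loopA, dif_neg h]
        simp

-- L4: the two rendering helpers agree
theorem to_b26_eq_word5 (w l : Int) : to_b26 w l = word5 w l := by
  simp only [to_b26, word5, PySem.List.slice?_none_none_neg_one, Option.getD_some,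
    word5go_eq_fuel w.toNat w le_rfl [], List.append_nil]

-- L5: B's pass 2 fold = prefixFrom
theorem foldl_prefix_eq (ds : List Int) : ∀ (out : List Int) (t : Int),
    (ds.foldl (fun (p : List Int × Int) d => (p.1 ++ [p.2 + d], p.2 + d)) (out, t)).1
      = out ++ prefixFrom t ds := by
  induction ds with
  | nil => intro out t; simp [prefixFrom]
  | cons d ds ih =>
      intro out t
      simp only [List.foldl_cons, prefixFrom, ih]
      simp

-- L3: A's fused loop = map render over the prefix sums of the decoded deltas
theorem decompA_eq : ∀ (n : Nat) (l : List Int) (cw : Int), l.length ≤ n →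
    decompA l cw = (prefixFrom cw (contFrom 0 0 l)).map (fun t => to_b26 t 5) := by
  intro n
  induction n with
  | zero =>
      intro l cw h
      have : l = [] := List.length_eq_zero_iff.mp (Nat.le_zero.mp h)
      subst this
      simp [decompA, contFrom, prefixFrom]
  | succ n ih =>
      intro l cw h
      cases l with
      | nil => simp [decompA, contFrom, prefixFrom]
      | cons b t =>
          rw [decompA]
          have hcf := contFrom_eq_upkA (b :: t) 0 0 (Or.inl (by simp))
          simp only [Nat.sub_zero] at hcf
          rw [hcf]
          simp only [prefixFrom, List.map_cons]
          congr 1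
          have hpos := upkA_snd_pos b t 0 0
          have hlen : ((b :: t).drop (upkA (b :: t) 0 0).2).length ≤ n := by
            simp only [List.length_drop, List.length_cons]
            simp only [List.length_cons] at h
            omega
          exact ih _ _ hlen

-- ===== VERDICT (by name: the statement is the Claim_ definition above) =====
theorem decompress_wordlist_varlen_spec : Claim_equal_decompress_wordlist_varlen := by
  intro compressed _
  unfold Spec_decompress_wordlist_varlen decompress_wordlist_varlen decompress_wordlist_varlen_alt
  rw [decompA_eq compressed.length compressed 0 le_rfl]
  have h1 := foldl_stepB_eq compressed [] 0 0
  simp only [List.nil_append] at h1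
  simp only [h1, foldl_prefix_eq, List.nil_append]
  exact List.map_congr_left fun t _ => to_b26_eq_word5 t 5
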